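-- pv_equiv track=rewrite | github.com/NotToDisturb/MoT_Bot | command_handlers/poke.py | poke_do_sources_evolutions
-- ===== SOURCE A (Python) =====
-- def poke_do_sources_evolutions(line):
--     evolutions = line["Evolves"].split("|")
--     has_from, has_to = False, False
--     from_text = "__Spotted pre-evolutions:__"
--     to_text = "__Spotted evolutions:__"
--     for evo_raw in evolutions:
--         evolution = evo_raw.split(":")
--         if evolution[0] == "from":
--             from_text += "\n" + evolution[1]
--             has_from = True
--         else:
--             to_text += "\n" + evolution[1]
--             has_to = True
--     return "We've seen part of its line!", (from_text + "\n\n" if has_from else "") + (to_text if has_to else "")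
-- ===== SOURCE B (Python) =====
-- def poke_do_sources_evolutions(line):
--     def go(entries):
--         if not entries:
--             return "", ""
--         if len(entries) == 1:
--             evo = entries[0].split(":")
--             v = "\n" + evo[1]
--             return (v, "") if evo[0] == "from" else ("", v)
--         mid = len(entries) // 2
--         f1, t1 = go(entries[:mid])
--         f2, t2 = go(entries[mid:])
--         return f1 + f2, t1 + t2
--     fs, ts = go(line["Evolves"].split("|"))
--     return ("We've seen part of its line!",
--             (("__Spotted pre-evolutions:__" + fs + "\n\n") if fs else "")
--             + (("__Spotted evolutions:__" + ts) if ts else ""))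
-- ===== Notes on version B (the rewrite author's own statement) =====
-- stated objective: alternative
-- what changed: A's single left-to-right loop carrying two boolean flags and two growing header-prefixed strings is replaced by a divide-and-conquer recursion: each half of the entry list yields a (pre, post) pair of text fragments that are merged by concatenation, headers are attached only at the end, and emptiness of the fragment replaces the flags.
import Mathlib
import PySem

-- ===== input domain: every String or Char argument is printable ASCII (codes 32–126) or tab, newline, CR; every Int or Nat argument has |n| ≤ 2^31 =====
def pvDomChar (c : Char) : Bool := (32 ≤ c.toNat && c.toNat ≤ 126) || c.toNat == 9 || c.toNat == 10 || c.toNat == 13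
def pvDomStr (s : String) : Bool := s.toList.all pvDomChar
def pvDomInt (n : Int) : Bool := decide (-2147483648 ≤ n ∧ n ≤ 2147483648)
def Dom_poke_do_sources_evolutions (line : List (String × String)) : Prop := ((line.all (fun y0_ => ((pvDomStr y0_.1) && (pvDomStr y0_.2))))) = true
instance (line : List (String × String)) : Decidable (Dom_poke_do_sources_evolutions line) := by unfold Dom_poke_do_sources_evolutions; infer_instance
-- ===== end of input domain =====

-- B replaces A's flag-carrying left-to-right accumulation loop by a divide-and-conquer
-- recursion merging (pre, post) text fragments; headers are attached at the end and string
-- emptiness replaces the flags. Objective: alternative decomposition, same practical cost.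

-- exact port of Python s.split(sep) for a nonempty literal sep (PySem.Chars.splitOn is s.split(sep))
def pvSplit (s sep : String) : List String :=
  (PySem.Chars.splitOn s.toList sep.toList).map String.ofList

-- ===== PORT A =====
def poke_do_sources_evolutions (line : List (String × String)) : String × String :=
  let evolutions := pvSplit ((PySem.Dict.ofList line).getD "Evolves" "") "|"
  let st := evolutions.foldl
    (fun (st : Bool × Bool × String × String) evo_raw =>
      let evolution := pvSplit evo_raw ":"
      if PySem.List.pyGetD evolution 0 "" == "from" then
        (true, st.2.1, st.2.2.1 ++ ("\n" ++ PySem.List.pyGetD evolution 1 ""), st.2.2.2)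
      else
        (st.1, true, st.2.2.1, st.2.2.2 ++ ("\n" ++ PySem.List.pyGetD evolution 1 "")))
    (false, false, "__Spotted pre-evolutions:__", "__Spotted evolutions:__")
  ("We've seen part of its line!",
   (if st.1 then st.2.2.1 ++ "\n\n" else "") ++ (if st.2.1 then st.2.2.2 else ""))

-- ===== PORT B =====
-- Source B's go: divide and conquer; entries[:mid]/entries[mid:] with 0 ≤ mid ≤ len are
-- exactly List.take/List.drop.
def pvGo : List String → String × String
  | [] => ("", "")
  | [e] =>
      let evo := pvSplit e ":"
      let v := "\n" ++ PySem.List.pyGetD evo 1 ""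
      if PySem.List.pyGetD evo 0 "" == "from" then (v, "") else ("", v)
  | e1 :: e2 :: rest =>
      let l := e1 :: e2 :: rest
      let mid := l.length / 2
      let p1 := pvGo (l.take mid)
      let p2 := pvGo (l.drop mid)
      (p1.1 ++ p2.1, p1.2 ++ p2.2)
termination_by l => l.length
decreasing_by
  · simp; omega
  · simp; omega

def poke_do_sources_evolutions_alt (line : List (String × String)) : String × String :=
  let p := pvGo (pvSplit ((PySem.Dict.ofList line).getD "Evolves" "") "|")
  ("We've seen part of its line!",
   (if !(p.1 == "") then "__Spotted pre-evolutions:__" ++ p.1 ++ "\n\n" else "") ++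
   (if !(p.2 == "") then "__Spotted evolutions:__" ++ p.2 else ""))

-- ===== PRECONDITION & SPEC =====
-- Pre_ excludes exactly the inputs where the Python A raises: a missing "Evolves" key (KeyError)
-- and any '|'-segment whose ':'-split has no second field (IndexError). B raises there too.
def Pre_poke_do_sources_evolutions (line : List (String × String)) : Prop :=
  (PySem.Dict.ofList line).contains "Evolves" = true ∧
  ∀ e ∈ pvSplit ((PySem.Dict.ofList line).getD "Evolves" "") "|",
    2 ≤ (pvSplit e ":").length
instance (line : List (String × String)) : Decidable (Pre_poke_do_sources_evolutions line) := by
  unfold Pre_poke_do_sources_evolutions; infer_instance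

def pvWitness_poke_do_sources_evolutions : (List (String × String)) :=
  [("Evolves", "from:Eevee|to:Jolteon")]

def Spec_poke_do_sources_evolutions (line : List (String × String)) (out : String × String) : Prop := out = poke_do_sources_evolutions_alt line
instance (line : List (String × String)) (out : String × String) : Decidable (Spec_poke_do_sources_evolutions line out) := by unfold Spec_poke_do_sources_evolutions; infer_instance

-- ===== CLAIM (what is proved, stated in full; the proofs are below) =====
def Claim_equal_poke_do_sources_evolutions : Prop := ∀ (line : List (String × String)), Dom_poke_do_sources_evolutions line → Pre_poke_do_sources_evolutions line → Spec_poke_do_sources_evolutions line (poke_do_sources_evolutions line)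

-- ===== LEMMAS AND PROOFS =====

def pvIsFrom (e : String) : Bool := PySem.List.pyGetD (pvSplit e ":") 0 "" == "from"
def pvTarget (e : String) : String := PySem.List.pyGetD (pvSplit e ":") 1 ""
def pvCat : List String → String
  | [] => ""
  | x :: xs => x ++ pvCat xs

lemma pvCat_append (a b : List String) : pvCat (a ++ b) = pvCat a ++ pvCat b := by
  induction a with
  | nil => simp [pvCat]
  | cons x xs ih => simp [pvCat, ih, String.append_assoc]

lemma pvGo_closed (l : List String) :
    pvGo l = (pvCat ((l.filter pvIsFrom).map (fun e => "\n" ++ pvTarget e)),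
              pvCat ((l.filter (fun e => !pvIsFrom e)).map (fun e => "\n" ++ pvTarget e))) := by
  induction l using pvGo.induct with
  | case1 => simp [pvGo, pvCat]
  | case2 e evo h =>
      simp only [evo] at h
      simp [pvGo, pvIsFrom, pvTarget, pvCat, h]
  | case3 e evo h =>
      simp only [evo] at h
      simp [pvGo, pvIsFrom, pvTarget, pvCat, h]
  | case4 e1 e2 rest lh mh ih1 ih2 =>
      rw [pvGo]
      rw [ih1, ih2]
      conv_rhs => rw [← List.take_append_drop ((e1 :: e2 :: rest).length / 2) (e1 :: e2 :: rest)]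
      rw [List.filter_append, List.filter_append, List.map_append, List.map_append,
          pvCat_append, pvCat_append]

lemma pvCat_nl_empty_iff (l : List String) :
    (pvCat (l.map (fun e => "\n" ++ pvTarget e)) == "") = l.isEmpty := by
  cases l with
  | nil => simp [pvCat]
  | cons x xs =>
      simp only [List.map_cons, pvCat, List.isEmpty_cons]
      have : ("\n" ++ pvTarget x ++ pvCat (xs.map (fun e => "\n" ++ pvTarget e))) ≠ "" := by
        intro h
        have := congrArg String.toList h
        simp at this
      simp [this]

lemma pv_foldl_closed (l : List String) (hf ht : Bool) (ft tt : String) :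
    l.foldl
      (fun (st : Bool × Bool × String × String) evo_raw =>
        let evolution := pvSplit evo_raw ":"
        if PySem.List.pyGetD evolution 0 "" == "from" then
          (true, st.2.1, st.2.2.1 ++ ("\n" ++ PySem.List.pyGetD evolution 1 ""), st.2.2.2)
        else
          (st.1, true, st.2.2.1, st.2.2.2 ++ ("\n" ++ PySem.List.pyGetD evolution 1 "")))
      (hf, ht, ft, tt)
    = (hf || l.any pvIsFrom, ht || l.any (fun e => !pvIsFrom e),
       ft ++ pvCat ((l.filter pvIsFrom).map (fun e => "\n" ++ pvTarget e)),
       tt ++ pvCat ((l.filter (fun e => !pvIsFrom e)).map (fun e => "\n" ++ pvTarget e))) := by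
  induction l generalizing hf ht ft tt with
  | nil => simp [pvCat]
  | cons e rest ih =>
      simp only [List.foldl_cons, List.any_cons, List.filter_cons]
      by_cases hp : pvIsFrom e = true
      · simp only [pvIsFrom] at hp
        rw [if_pos hp, ih]
        simp [hp, pvIsFrom, pvTarget, pvCat, String.append_assoc]
      · simp only [pvIsFrom] at hp
        rw [if_neg hp, ih]
        simp [hp, pvIsFrom, pvTarget, pvCat, String.append_assoc]

lemma pv_any_eq_not_isEmpty (l : List String) (p : String → Bool) :
    l.any p = !(l.filter p).isEmpty := by
  induction l with
  | nil => simp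
  | cons x xs ih => by_cases h : p x = true <;> simp [h, ih]

-- ===== VERDICT (by name: the statement is the Claim_ definition above) =====
theorem poke_do_sources_evolutions_spec : Claim_equal_poke_do_sources_evolutions := by
  intro line _ _
  unfold Spec_poke_do_sources_evolutions poke_do_sources_evolutions poke_do_sources_evolutions_alt
  simp only []
  set l := pvSplit ((PySem.Dict.ofList line).getD "Evolves" "") "|" with hl
  rw [pv_foldl_closed, pvGo_closed]
  simp only [pv_any_eq_not_isEmpty, pvCat_nl_empty_iff, Bool.false_or]
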